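-- pv_equiv track=rewrite | github.com/openkamer/openkamer | scraper/persons.py | clean_initials
-- ===== SOURCE A (Python) =====
-- def clean_initials(initials):
--     """ Removes the second character in initials, for example: 'Th.H.Ph.' is changed to 'T.H.P.' """
--     parts = initials.split('.')
--     initials_new = ''
--     for part in parts:
--         if not part:
--             continue
--         initials_new += part[0] + '.'
--     return initials_new
-- ===== SOURCE B (Python) =====
-- def clean_initials(initials):
--     """Single pass over the characters: no split; a flag tracks whether the
--     current dot-separated segment has already contributed its first letter."""
--     out = []
--     emitted = False
--     for c in initials:
--         if c == '.':
--             emitted = False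
--         elif not emitted:
--             out.append(c)
--             out.append('.')
--             emitted = True
--     return ''.join(out)
-- ===== Notes on version B (the rewrite author's own statement) =====
-- stated objective: alternative
-- what changed: Replaces split('.')-then-loop-over-parts with a single character scan keeping a boolean 'emitted' flag per segment, so no intermediate list of parts is built.
import Mathlib
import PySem

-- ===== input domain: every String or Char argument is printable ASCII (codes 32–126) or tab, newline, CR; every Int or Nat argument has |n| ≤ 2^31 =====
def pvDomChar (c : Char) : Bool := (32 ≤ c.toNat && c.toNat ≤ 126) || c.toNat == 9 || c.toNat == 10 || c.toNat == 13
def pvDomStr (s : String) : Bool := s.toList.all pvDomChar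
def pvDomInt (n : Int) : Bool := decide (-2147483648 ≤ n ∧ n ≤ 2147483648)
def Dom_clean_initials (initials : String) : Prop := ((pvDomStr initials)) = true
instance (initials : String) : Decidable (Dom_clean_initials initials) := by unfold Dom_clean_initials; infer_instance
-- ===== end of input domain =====

-- B replaces split('.')+loop over parts with a single character scan keeping an 'emitted' flag (alternative decomposition, same cost).


-- ===== PORT A =====
-- parts = initials.split('.'); for part in parts: if not part: continue; initials_new += part[0] + '.'
def clean_initials (initials : String) : String :=
  let parts := PySem.Chars.splitOn initials.toList ['.']
  String.ofList (parts.foldl (fun acc part =>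
    if part.isEmpty then acc
    else acc ++ ((PySem.List.pyGet? part 0).map (fun c => [c, '.'])).getD []) [])

-- ===== PORT B =====
-- single pass, state = (output chars, emitted flag for the current segment)
def clean_initials_alt (initials : String) : String :=
  String.ofList ((initials.toList.foldl (fun (st : List Char × Bool) c =>
    if c = '.' then (st.1, false)
    else if st.2 then st
    else (st.1 ++ [c, '.'], true)) ([], false)).1)

-- ===== PRECONDITION & SPEC =====
def Spec_clean_initials (initials : String) (out : String) : Prop := out = clean_initials_alt initials
instance (initials : String) (out : String) : Decidable (Spec_clean_initials initials out) := by unfold Spec_clean_initials; infer_instance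

-- ===== CLAIM (what is proved, stated in full; the proofs are below) =====
def Claim_equal_clean_initials : Prop := ∀ (initials : String), Dom_clean_initials initials → Spec_clean_initials initials (clean_initials initials)

-- ===== LEMMAS AND PROOFS =====

-- a clean structural recursion equal to PySem.Chars.splitOn's fuelled loop for sep = ['.']
def splitAux : List Char → List Char → List (List Char)
  | [], cur => [cur.reverse]
  | c :: rest, cur =>
      if c = '.' then cur.reverse :: splitAux rest [] else splitAux rest (c :: cur)

lemma splitOn_go_spec : ∀ (fuel : Nat) (l cur : List Char) (acc : List (List Char)), l.length < fuel →
    PySem.Chars.splitOn.go ['.'] fuel l cur acc = acc.reverse ++ splitAux l cur := by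
  intro fuel
  induction fuel with
  | zero => intro l cur acc h; omega
  | succ n ih =>
    intro l cur acc h
    cases l with
    | nil => rw [PySem.Chars.splitOn.go.eq_def]; simp [splitAux]
    | cons c rest =>
      rw [PySem.Chars.splitOn.go.eq_def]
      simp only [List.length_cons] at h
      by_cases hc : c = '.'
      · subst hc
        simp [List.isPrefixOf, ih rest [] (cur.reverse :: acc) (by omega), splitAux]
      · simp [List.isPrefixOf, hc, ih rest (c :: cur) acc (by omega), splitAux]
        exact fun h' => absurd h'.symm hc

lemma splitOn_eq_splitAux (cs : List Char) :
    PySem.Chars.splitOn cs ['.'] = splitAux cs [] := by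
  have := splitOn_go_spec (cs.length + 1) cs [] [] (by omega)
  simpa [PySem.Chars.splitOn] using this

lemma main_lemma : ∀ (l cur acc : List Char),
    (splitAux l cur).foldl (fun acc part =>
        if part.isEmpty then acc
        else acc ++ ((PySem.List.pyGet? part 0).map (fun c => [c, '.'])).getD []) acc =
    (match cur.reverse with
     | [] => (l.foldl (fun (st : List Char × Bool) c =>
          if c = '.' then (st.1, false) else if st.2 then st
          else (st.1 ++ [c, '.'], true)) (acc, false)).1
     | d :: _ => (l.foldl (fun (st : List Char × Bool) c =>
          if c = '.' then (st.1, false) else if st.2 then st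
          else (st.1 ++ [c, '.'], true)) (acc ++ [d, '.'], true)).1) := by
  intro l
  induction l with
  | nil =>
    intro cur acc
    cases h : cur.reverse with
    | nil => simp [splitAux, h]
    | cons d t => simp [splitAux, h, PySem.List.pyGet?, PySem.List.pyIdx?]
  | cons c rest ih =>
    intro cur acc
    by_cases hc : c = '.'
    · subst hc
      cases h : cur.reverse with
      | nil =>
        simp only [splitAux, List.foldl_cons, h, List.isEmpty_nil, if_true]
        have := ih [] acc
        simpa using this
      | cons d t =>
        simp only [splitAux, List.foldl_cons, h]
        have := ih [] (acc ++ [d, '.'])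
        simpa [PySem.List.pyGet?, PySem.List.pyIdx?] using this
    · cases h : cur.reverse with
      | nil =>
        have hcur : cur = [] := by
          have := congrArg List.reverse h; simpa using this
        subst hcur
        simp only [splitAux, List.foldl_cons, if_neg hc]
        have := ih [c] acc
        simpa [hc] using this
      | cons d t =>
        simp only [splitAux, if_neg hc]
        have hrev : (c :: cur).reverse = d :: (t ++ [c]) := by
          simp [h]
        have := ih (c :: cur) acc
        rw [this, hrev]
        simp [hc]

-- ===== VERDICT (by name: the statement is the Claim_ definition above) =====
theorem clean_initials_spec : Claim_equal_clean_initials := by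
  intro initials _
  unfold Spec_clean_initials clean_initials clean_initials_alt
  rw [splitOn_eq_splitAux]
  have h := main_lemma initials.toList [] []
  simp only at h
  exact congrArg String.ofList h
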